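-- pv_equiv track=rewrite | github.com/mateu/Bracket | script/parent-gen.py | generate_game_teams
-- ===== SOURCE A (Python) =====
-- def generate_game_teams(start, end):
--     w = 0
--     for _ in range(0,4):
--         z = 0
--         for x in range(start, end + 1):
--             for _ in range(1, 3):
--                 z = z+1
--                 yield (x+w*15, z+w*16)
--         w = w+1
-- ===== SOURCE B (Python) =====
-- def generate_game_teams(start, end):
--     # single flat loop over a linear counter; recovers bracket w and team slot by divmod
--     n = end - start + 1
--     if n < 0:
--         n = 0
--     for i in range(8 * n):
--         w, r = divmod(i, 2 * n)
--         yield (start + r // 2 + w * 15, r + 1 + w * 16)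
-- ===== Notes on version B (the rewrite author's own statement) =====
-- stated objective: simpler
-- what changed: Replaced A's three nested loops with mutable w/z counters by one flat loop over a linear counter i in range(8*n), recovering the bracket index and team slot with divmod and computing the game index by a closed-form (start + r//2 + w*15).
import Mathlib
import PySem

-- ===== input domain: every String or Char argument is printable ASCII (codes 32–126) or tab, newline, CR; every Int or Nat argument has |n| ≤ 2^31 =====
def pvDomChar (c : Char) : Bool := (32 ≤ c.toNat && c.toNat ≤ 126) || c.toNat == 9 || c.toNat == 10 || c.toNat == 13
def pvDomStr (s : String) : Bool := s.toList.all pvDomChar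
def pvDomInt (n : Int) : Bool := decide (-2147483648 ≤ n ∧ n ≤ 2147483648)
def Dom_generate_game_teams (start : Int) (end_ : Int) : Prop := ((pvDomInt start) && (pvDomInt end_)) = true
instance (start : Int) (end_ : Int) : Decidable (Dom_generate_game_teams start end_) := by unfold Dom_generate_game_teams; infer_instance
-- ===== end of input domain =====

-- B flattens A's three nested loops into one linear counter with divmod; objective: simpler decomposition.
-- A is a Python generator; equivalence is about the sequence of yielded values (as a list).


-- ===== PORT A =====
def generate_game_teams (start : Int) (end_ : Int) : List (Int × Int) :=
  let fin := (PySem.List.pyRange 0 4 1).foldl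
    (fun (st : Int × List (Int × Int)) _ =>
      let w := st.1
      let inner := (PySem.List.pyRange start (end_ + 1) 1).foldl
        (fun (zt : Int × List (Int × Int)) x =>
          (PySem.List.pyRange 1 3 1).foldl
            (fun (zt2 : Int × List (Int × Int)) _ =>
              (zt2.1 + 1, zt2.2 ++ [(x + w * 15, zt2.1 + 1 + w * 16)])) zt)
        ((0 : Int), st.2)
      (w + 1, inner.2))
    ((0 : Int), ([] : List (Int × Int)))
  fin.2

-- ===== PORT B =====
def generate_game_teams_alt (start : Int) (end_ : Int) : List (Int × Int) :=
  let n0 := end_ - start + 1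
  let n := if n0 < 0 then 0 else n0
  (PySem.List.pyRange 0 (8 * n) 1).map (fun i =>
    let w := PySem.Int.floordiv i (2 * n)
    let r := PySem.Int.mod i (2 * n)
    (start + PySem.Int.floordiv r 2 + w * 15, r + 1 + w * 16))

-- ===== PRECONDITION & SPEC =====
def Spec_generate_game_teams (start : Int) (end_ : Int) (out : List (Int × Int)) : Prop := out = generate_game_teams_alt start end_
instance (start : Int) (end_ : Int) (out : List (Int × Int)) : Decidable (Spec_generate_game_teams start end_ out) := by unfold Spec_generate_game_teams; infer_instance

-- ===== CLAIM (what is proved, stated in full; the proofs are below) =====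
def Claim_equal_generate_game_teams : Prop := ∀ (start : Int) (end_ : Int), Dom_generate_game_teams start end_ → Spec_generate_game_teams start end_ (generate_game_teams start end_)

-- ===== LEMMAS AND PROOFS =====

/-- One bracket's worth of yields, as a function of the team offset pair `(c, d) = (w*15, w*16)`. -/
def blockF (s : Int) (N : Nat) (c d : Int) : List (Int × Int) :=
  (List.range N).flatMap (fun k : Nat =>
    [(s + (k : Int) + c, 2 * (k : Int) + 1 + d), (s + (k : Int) + c, 2 * (k : Int) + 2 + d)])

theorem innerA (w : Int) (n : Nat) (a : Int) (acc : List (Int × Int)) :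
    ((List.range n).map (fun k : Nat => a + (k : Int))).foldl
      (fun (zt : Int × List (Int × Int)) x =>
        (PySem.List.pyRange 1 3 1).foldl
          (fun (zt2 : Int × List (Int × Int)) _ =>
            (zt2.1 + 1, zt2.2 ++ [(x + w * 15, zt2.1 + 1 + w * 16)])) zt)
      ((0 : Int), acc)
    = (((2 * n : Nat) : Int), acc ++ blockF a n (w * 15) (w * 16)) := by
  induction n with
  | zero => simp [blockF]
  | succ n ih =>
    rw [List.range_succ, List.map_append, List.foldl_append, ih]
    simp [blockF, List.range_succ, show PySem.List.pyRange 1 3 1 = [1, 2] from by decide]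
    constructor <;> ring

theorem pairing {α : Type} (n : Nat) (f : Nat → α) :
    (List.range (2 * n)).map f = (List.range n).flatMap (fun k => [f (2 * k), f (2 * k + 1)]) := by
  induction n with
  | zero => simp
  | succ n ih =>
    rw [show 2 * (n + 1) = (2 * n + 1) + 1 from by omega, List.range_succ, List.range_succ,
      List.map_append, List.map_append, ih, List.range_succ]
    simp

theorem A_eq (s e : Int) :
    generate_game_teams s e =
      blockF s (e + 1 - s).toNat 0 0 ++ blockF s (e + 1 - s).toNat 15 16 ++
      blockF s (e + 1 - s).toNat 30 32 ++ blockF s (e + 1 - s).toNat 45 48 := by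
  unfold generate_game_teams
  rw [show PySem.List.pyRange 0 4 1 = [0, 1, 2, 3] from by decide,
    PySem.List.pyRange_one s (e + 1)]
  simp only [List.foldl_cons, List.foldl_nil]
  rw [innerA, innerA, innerA, innerA]
  simp [List.append_assoc]

/-- B's per-index value, divmod arithmetic done in Nat. -/
def gB (s : Int) (N : Nat) (i : Nat) : Int × Int :=
  (s + ((i % (2 * N) / 2 : Nat) : Int) + ((i / (2 * N) : Nat) : Int) * 15,
   ((i % (2 * N) : Nat) : Int) + 1 + ((i / (2 * N) : Nat) : Int) * 16)

theorem gB_block (s : Int) (N w : Nat) :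
    (List.range (2 * N)).map (fun r => gB s N (w * (2 * N) + r))
      = blockF s N ((w * 15 : Nat) : Int) ((w * 16 : Nat) : Int) := by
  have hpt : ∀ r ∈ List.range (2 * N),
      gB s N (w * (2 * N) + r)
        = (s + ((r / 2 : Nat) : Int) + ((w * 15 : Nat) : Int), ((r : Nat) : Int) + 1 + ((w * 16 : Nat) : Int)) := by
    intro r hr
    rw [List.mem_range] at hr
    have h1 : (w * (2 * N) + r) / (2 * N) = w := by
      rw [Nat.mul_comm, Nat.mul_add_div (by omega), Nat.div_eq_of_lt hr, Nat.add_zero]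
    have h2 : (w * (2 * N) + r) % (2 * N) = r := by
      rw [Nat.mul_add_mod', Nat.mod_eq_of_lt hr]
    simp only [gB, h1, h2, Prod.mk.injEq]
    constructor
    · push_cast; ring
    · push_cast; ring
  rw [List.map_congr_left hpt, pairing N]
  unfold blockF
  have hfun : (fun k : Nat =>
      [(s + (((2 * k) / 2 : Nat) : Int) + ((w * 15 : Nat) : Int), ((2 * k : Nat) : Int) + 1 + ((w * 16 : Nat) : Int)),
       (s + (((2 * k + 1) / 2 : Nat) : Int) + ((w * 15 : Nat) : Int), ((2 * k + 1 : Nat) : Int) + 1 + ((w * 16 : Nat) : Int))])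
      = (fun k : Nat =>
      [(s + (k : Int) + ((w * 15 : Nat) : Int), 2 * (k : Int) + 1 + ((w * 16 : Nat) : Int)),
       (s + (k : Int) + ((w * 15 : Nat) : Int), 2 * (k : Int) + 2 + ((w * 16 : Nat) : Int))]) := by
    funext k
    have e1 : 2 * k / 2 = k := by omega
    have e2 : (2 * k + 1) / 2 = k := by omega
    rw [e1, e2]
    simp only [List.cons.injEq, Prod.mk.injEq, and_true]
    push_cast
    exact ⟨⟨trivial, rfl⟩, trivial, by ring⟩
  rw [hfun]

theorem B_blocks (s : Int) (N : Nat) :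
    (List.range (8 * N)).map (gB s N)
      = blockF s N ((0 * 15 : Nat) : Int) ((0 * 16 : Nat) : Int) ++ blockF s N ((1 * 15 : Nat) : Int) ((1 * 16 : Nat) : Int)
        ++ blockF s N ((2 * 15 : Nat) : Int) ((2 * 16 : Nat) : Int) ++ blockF s N ((3 * 15 : Nat) : Int) ((3 * 16 : Nat) : Int) := by
  rw [show 8 * N = 2 * N + (2 * N + (2 * N + 2 * N)) from by ring, List.range_add, List.range_add,
    List.range_add]
  simp only [List.map_append, List.map_map, Function.comp_def]
  have h0 : List.map (gB s N) (List.range (2 * N))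
      = List.map (fun r : Nat => gB s N (0 * (2 * N) + r)) (List.range (2 * N)) :=
    List.map_congr_left fun r _ => congrArg (gB s N) (by ring)
  rw [show (fun r : Nat => gB s N (2 * N + (2 * N + (2 * N + r)))) = (fun r : Nat => gB s N (3 * (2 * N) + r)) from
        funext fun r => congrArg (gB s N) (by ring),
      show (fun r : Nat => gB s N (2 * N + (2 * N + r))) = (fun r : Nat => gB s N (2 * (2 * N) + r)) from
        funext fun r => congrArg (gB s N) (by ring),
      show (fun r : Nat => gB s N (2 * N + r)) = (fun r : Nat => gB s N (1 * (2 * N) + r)) from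
        funext fun r => congrArg (gB s N) (by ring),
      h0, gB_block s N 0, gB_block s N 1, gB_block s N 2, gB_block s N 3]
  simp [List.append_assoc]

theorem B_eq (s e : Int) :
    generate_game_teams_alt s e =
      blockF s (e + 1 - s).toNat 0 0 ++ blockF s (e + 1 - s).toNat 15 16 ++
      blockF s (e + 1 - s).toNat 30 32 ++ blockF s (e + 1 - s).toNat 45 48 := by
  unfold generate_game_teams_alt
  dsimp only
  set N := (e + 1 - s).toNat with hN
  have hn : (if e - s + 1 < 0 then (0 : Int) else e - s + 1) = ((N : Nat) : Int) := by
    simp only [hN]; omega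
  rw [hn, show (8 : Int) * ((N : Nat) : Int) = ((8 * N : Nat) : Int) from by push_cast; ring,
    PySem.List.pyRange_zero_natCast, List.map_map]
  have key : ∀ i ∈ List.range (8 * N),
      ((fun i : Int =>
          (s + PySem.Int.floordiv (PySem.Int.mod i (2 * ((N : Nat) : Int))) 2 +
              PySem.Int.floordiv i (2 * ((N : Nat) : Int)) * 15,
            PySem.Int.mod i (2 * ((N : Nat) : Int)) + 1 +
              PySem.Int.floordiv i (2 * ((N : Nat) : Int)) * 16)) ∘ (fun k : Nat => (k : Int))) i
        = gB s N i := by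
    intro i _
    have h2 : (2 : Int) * ((N : Nat) : Int) = ((2 * N : Nat) : Int) := by push_cast; ring
    simp only [Function.comp_def, h2, PySem.Int.floordiv_natCast, PySem.Int.mod_natCast, gB]
    rw [show (2 : Int) = ((2 : Nat) : Int) from by norm_num, PySem.Int.floordiv_natCast]
  rw [List.map_congr_left key, B_blocks]
  norm_num

-- ===== VERDICT (by name: the statement is the Claim_ definition above) =====
theorem generate_game_teams_spec : Claim_equal_generate_game_teams := by
  intro s e _
  unfold Spec_generate_game_teams
  rw [A_eq, B_eq]
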